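-- pv_equiv track=rewrite | github.com/darkamulet1/refraction | docs/extractor_knowledge/Extractor/planet_friendships_extract.py | _build_net_relation
-- ===== SOURCE A (Python) =====
-- from typing import Any, Dict, List, Optional
--
-- def _build_net_relation(
--     planet_id: int,
--     natural_friends: List[int],
--     natural_enemies: List[int],
--     temporary_friends: List[int],
--     temporary_enemies: List[int],
--     natural_neutral: List[int],
--     planet_names: List[str],
-- ) -> Dict[str, List[str]]:
--     scores: Dict[int, int] = {}
--     for target in range(9):
--         if target == planet_id:
--             continue
--         score = 0
--         if target in natural_friends:
--             score += 1
--         if target in natural_enemies: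
--             score -= 1
--         if target in temporary_friends:
--             score += 1
--         if target in temporary_enemies:
--             score -= 1
--         # Neutral counts as slight friend bias
--         if target in natural_neutral:
--             score += 0
--         if score != 0:
--             scores[target] = score
--     friends = [planet_names[idx] for idx, value in scores.items() if value > 0]
--     enemies = [planet_names[idx] for idx, value in scores.items() if value < 0]
--     return {"friends": sorted(set(friends)), "enemies": sorted(set(enemies))}
-- ===== SOURCE B (Python) =====
-- def _build_net_relation(
--     planet_id,
--     natural_friends,
--     natural_enemies,
--     temporary_friends,
--     temporary_enemies,
--     natural_neutral,
--     planet_names,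
-- ):
--     # Scatter: each relationship list contributes +/-1 per distinct member;
--     # the neutral list contributes nothing and is ignored.
--     scores = {}
--     for t in set(natural_friends):
--         scores[t] = scores.get(t, 0) + 1
--     for t in set(temporary_friends):
--         scores[t] = scores.get(t, 0) + 1
--     for t in set(natural_enemies):
--         scores[t] = scores.get(t, 0) - 1
--     for t in set(temporary_enemies):
--         scores[t] = scores.get(t, 0) - 1
--     friends = set()
--     enemies = set()
--     for t, v in scores.items():
--         if 0 <= t < 9 and t != planet_id and v != 0:
--             name = planet_names[t]
--             if v > 0:
--                 friends.add(name)
--             else: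
--                 enemies.add(name)
--     return {"friends": sorted(friends), "enemies": sorted(enemies)}
-- ===== Notes on version B (the rewrite author's own statement) =====
-- stated objective: alternative
-- what changed: B scatters +/-1 over the (deduplicated) relationship lists into a score dict and then filters its entries by 0<=id<9 and id!=planet_id, instead of A's gather loop over range(9) with four linear membership scans per target; the neutral list, which A consults but weights 0, is dropped entirely.
import Mathlib
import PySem

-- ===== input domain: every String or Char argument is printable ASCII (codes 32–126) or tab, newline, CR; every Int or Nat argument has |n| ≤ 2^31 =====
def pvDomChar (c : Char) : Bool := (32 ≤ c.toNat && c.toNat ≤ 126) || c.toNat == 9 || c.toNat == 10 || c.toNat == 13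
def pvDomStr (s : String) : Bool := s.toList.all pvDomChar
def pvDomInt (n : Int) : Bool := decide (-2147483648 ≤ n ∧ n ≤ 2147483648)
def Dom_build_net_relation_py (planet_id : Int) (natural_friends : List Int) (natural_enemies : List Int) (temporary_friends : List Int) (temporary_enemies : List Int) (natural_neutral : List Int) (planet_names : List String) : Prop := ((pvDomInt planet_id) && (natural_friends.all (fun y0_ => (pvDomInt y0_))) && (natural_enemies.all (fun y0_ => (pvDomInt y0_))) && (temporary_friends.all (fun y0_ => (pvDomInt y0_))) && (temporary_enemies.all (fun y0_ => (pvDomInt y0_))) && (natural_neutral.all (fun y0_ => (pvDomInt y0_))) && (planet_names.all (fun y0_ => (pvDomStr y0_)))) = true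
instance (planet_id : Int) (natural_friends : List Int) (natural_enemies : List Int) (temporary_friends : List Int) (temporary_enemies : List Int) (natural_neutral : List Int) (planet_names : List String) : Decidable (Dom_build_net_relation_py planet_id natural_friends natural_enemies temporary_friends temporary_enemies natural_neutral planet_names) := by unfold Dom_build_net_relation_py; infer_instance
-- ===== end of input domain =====

-- B replaces A's gather loop over range(9) (four membership scans per target) by scattering
-- +/-1 over the deduplicated relationship lists into one score dict and filtering its entries;
-- objective: alternative decomposition of the same computation (no speed claim).

-- ===== PORT A =====
def build_net_relation_py (planet_id : Int) (natural_friends : List Int) (natural_enemies : List Int) (temporary_friends : List Int) (temporary_enemies : List Int) (natural_neutral : List Int) (planet_names : List String) : List (String × List String) :=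
  let scores : PySem.Dict Int Int :=
    (PySem.List.pyRange 0 9 1).foldl (fun d target =>
      if target = planet_id then d
      else
        let score0 : Int := 0
        let score1 := if natural_friends.contains target then score0 + 1 else score0
        let score2 := if natural_enemies.contains target then score1 - 1 else score1
        let score3 := if temporary_friends.contains target then score2 + 1 else score2
        let score4 := if temporary_enemies.contains target then score3 - 1 else score3
        -- Neutral counts as slight friend bias (adds 0)
        let score5 := if natural_neutral.contains target then score4 + 0 else score4
        if score5 ≠ 0 then d.insert target score5 else d) PySem.Dict.empty
  let friends := (scores.items.filter (fun p => decide (0 < p.2))).map (fun p => PySem.List.pyGetD planet_names p.1 "")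
  let enemies := (scores.items.filter (fun p => decide (p.2 < 0))).map (fun p => PySem.List.pyGetD planet_names p.1 "")
  [("friends", PySem.List.sorted (PySem.Set.ofList friends) (fun x => x) false),
   ("enemies", PySem.List.sorted (PySem.Set.ofList enemies) (fun x => x) false)]

-- ===== PORT B =====
-- helper of B: the four scatter loops ('for t in set(l): scores[t] = scores.get(t, 0) ± 1')
def scoresB (natural_friends natural_enemies temporary_friends temporary_enemies : List Int) : PySem.Dict Int Int :=
  let d1 := (PySem.Set.ofList natural_friends).foldl (fun d t => d.modify t 0 (fun x => x + 1)) PySem.Dict.empty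
  let d2 := (PySem.Set.ofList temporary_friends).foldl (fun d t => d.modify t 0 (fun x => x + 1)) d1
  let d3 := (PySem.Set.ofList natural_enemies).foldl (fun d t => d.modify t 0 (fun x => x - 1)) d2
  (PySem.Set.ofList temporary_enemies).foldl (fun d t => d.modify t 0 (fun x => x - 1)) d3

-- helper of B: the body of the filtering loop over scores.items()
def bStep (planet_id : Int) (planet_names : List String) (fe : PySem.Set String × PySem.Set String) (p : Int × Int) : PySem.Set String × PySem.Set String :=
  if 0 ≤ p.1 ∧ p.1 < 9 ∧ p.1 ≠ planet_id ∧ p.2 ≠ 0 then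
    let name := PySem.List.pyGetD planet_names p.1 ""
    if 0 < p.2 then (fe.1.add name, fe.2) else (fe.1, fe.2.add name)
  else fe

def build_net_relation_py_alt (planet_id : Int) (natural_friends : List Int) (natural_enemies : List Int) (temporary_friends : List Int) (temporary_enemies : List Int) (natural_neutral : List Int) (planet_names : List String) : List (String × List String) :=
  let scores := scoresB natural_friends natural_enemies temporary_friends temporary_enemies
  let fe := scores.items.foldl (bStep planet_id planet_names) (PySem.Set.empty, PySem.Set.empty)
  [("friends", PySem.List.sorted fe.1 (fun x => x) false),
   ("enemies", PySem.List.sorted fe.2 (fun x => x) false)]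

-- ===== PRECONDITION & SPEC =====
-- the net relationship score of a target (membership in each list contributes ±1)
def relScore (natural_friends natural_enemies temporary_friends temporary_enemies : List Int) (t : Int) : Int :=
  (if t ∈ natural_friends then (1 : Int) else 0) - (if t ∈ natural_enemies then 1 else 0)
    + (if t ∈ temporary_friends then 1 else 0) - (if t ∈ temporary_enemies then 1 else 0)

-- Pre_ excludes exactly the inputs on which the Python A raises IndexError: some target in 0..8
-- other than planet_id has a nonzero net score but no entry in planet_names.
def Pre_build_net_relation_py (planet_id : Int) (natural_friends : List Int) (natural_enemies : List Int) (temporary_friends : List Int) (temporary_enemies : List Int) (natural_neutral : List Int) (planet_names : List String) : Prop :=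
  ∀ t ∈ PySem.List.pyRange 0 9 1, t ≠ planet_id →
    relScore natural_friends natural_enemies temporary_friends temporary_enemies t ≠ 0 →
    t < (planet_names.length : Int)
instance (planet_id : Int) (natural_friends : List Int) (natural_enemies : List Int) (temporary_friends : List Int) (temporary_enemies : List Int) (natural_neutral : List Int) (planet_names : List String) : Decidable (Pre_build_net_relation_py planet_id natural_friends natural_enemies temporary_friends temporary_enemies natural_neutral planet_names) := by unfold Pre_build_net_relation_py; infer_instance

def pvWitness_build_net_relation_py : Int × List Int × List Int × List Int × List Int × List Int × List String :=
  (0, [1], [2], [], [], [], ["a", "b", "c"])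

def Spec_build_net_relation_py (planet_id : Int) (natural_friends : List Int) (natural_enemies : List Int) (temporary_friends : List Int) (temporary_enemies : List Int) (natural_neutral : List Int) (planet_names : List String) (out : List (String × List String)) : Prop := out = build_net_relation_py_alt planet_id natural_friends natural_enemies temporary_friends temporary_enemies natural_neutral planet_names
instance (planet_id : Int) (natural_friends : List Int) (natural_enemies : List Int) (temporary_friends : List Int) (temporary_enemies : List Int) (natural_neutral : List Int) (planet_names : List String) (out : List (String × List String)) : Decidable (Spec_build_net_relation_py planet_id natural_friends natural_enemies temporary_friends temporary_enemies natural_neutral planet_names out) := by unfold Spec_build_net_relation_py; infer_instance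

-- ===== CLAIM =====
def Claim_equal_build_net_relation_py : Prop := ∀ (planet_id : Int) (natural_friends : List Int) (natural_enemies : List Int) (temporary_friends : List Int) (temporary_enemies : List Int) (natural_neutral : List Int) (planet_names : List String), Dom_build_net_relation_py planet_id natural_friends natural_enemies temporary_friends temporary_enemies natural_neutral planet_names → Pre_build_net_relation_py planet_id natural_friends natural_enemies temporary_friends temporary_enemies natural_neutral planet_names → Spec_build_net_relation_py planet_id natural_friends natural_enemies temporary_friends temporary_enemies natural_neutral planet_names (build_net_relation_py planet_id natural_friends natural_enemies temporary_friends temporary_enemies natural_neutral planet_names)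

-- ===== LEMMAS AND PROOFS =====

-- A's per-target score (the let-chain) is relScore; the neutral list contributes nothing.
lemma aBody_eq (planet_id : Int) (nf ne tf te nn : List Int) :
    (fun (d : PySem.Dict Int Int) target =>
      if target = planet_id then d
      else
        let score0 : Int := 0
        let score1 := if nf.contains target then score0 + 1 else score0
        let score2 := if ne.contains target then score1 - 1 else score1
        let score3 := if tf.contains target then score2 + 1 else score2
        let score4 := if te.contains target then score3 - 1 else score3
        let score5 := if nn.contains target then score4 + 0 else score4
        if score5 ≠ 0 then d.insert target score5 else d)
    = (fun (d : PySem.Dict Int Int) t =>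
        if t ≠ planet_id ∧ relScore nf ne tf te t ≠ 0 then d.insert t (relScore nf ne tf te t) else d) := by
  funext d t
  have hs : (let score0 : Int := 0
      let score1 := if nf.contains t then score0 + 1 else score0
      let score2 := if ne.contains t then score1 - 1 else score1
      let score3 := if tf.contains t then score2 + 1 else score2
      let score4 := if te.contains t then score3 - 1 else score3
      if nn.contains t then score4 + 0 else score4) = relScore nf ne tf te t := by
    simp only [relScore, List.contains_iff_mem]
    split_ifs <;> omega
  by_cases hp : t = planet_id
  · simp [hp]
  · simp only [hp, if_false, hs, ite_not]
    by_cases hz : relScore nf ne tf te t = 0 <;> simp [hz, hp]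

-- a fold that conditionally inserts fresh distinct keys appends its insertions in order
lemma items_foldl_condInsert (c : Int → Prop) [DecidablePred c] (g : Int → Int) :
    ∀ (l : List Int) (d : PySem.Dict Int Int), (∀ t ∈ l, d.contains t = false) → l.Nodup →
      (l.foldl (fun d t => if c t then d.insert t (g t) else d) d).items
        = d.items ++ (l.filter (fun t => decide (c t))).map (fun t => (t, g t))
  | [], d, _, _ => by simp
  | a :: l, d, hf, hnd => by
    simp only [List.foldl_cons, List.filter_cons]
    by_cases hc : c a
    · have hfresh : ∀ t ∈ l, (d.insert a (g a)).contains t = false := by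
        intro t ht
        rw [PySem.Dict.contains_insert]
        have : t ≠ a := fun h => (List.nodup_cons.mp hnd).1 (h ▸ ht)
        simp [this, hf t (List.mem_cons_of_mem _ ht)]
      rw [if_pos hc, items_foldl_condInsert c g l _ hfresh (List.nodup_cons.mp hnd).2,
        PySem.Dict.items_insert_of_not_contains _ _ (hf a (List.mem_cons_self ..))]
      simp [hc]
    · rw [if_neg hc, items_foldl_condInsert c g l d (fun t ht => hf t (List.mem_cons_of_mem _ ht)) (List.nodup_cons.mp hnd).2]
      simp [hc]

lemma A_items (planet_id : Int) (nf ne tf te nn : List Int) :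
    ((PySem.List.pyRange 0 9 1).foldl (fun d target =>
      if target = planet_id then d
      else
        let score0 : Int := 0
        let score1 := if nf.contains target then score0 + 1 else score0
        let score2 := if ne.contains target then score1 - 1 else score1
        let score3 := if tf.contains target then score2 + 1 else score2
        let score4 := if te.contains target then score3 - 1 else score3
        let score5 := if nn.contains target then score4 + 0 else score4
        if score5 ≠ 0 then d.insert target score5 else d) PySem.Dict.empty).items
    = ((PySem.List.pyRange 0 9 1).filter (fun t => decide (t ≠ planet_id ∧ relScore nf ne tf te t ≠ 0))).map
        (fun t => (t, relScore nf ne tf te t)) := by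
  rw [aBody_eq, items_foldl_condInsert (fun t => t ≠ planet_id ∧ relScore nf ne tf te t ≠ 0)
    (fun t => relScore nf ne tf te t) _ _ (by intro t _; exact PySem.Dict.contains_empty t) (by decide)]
  rw [show (PySem.Dict.empty : PySem.Dict Int Int).items = [] from rfl, List.nil_append]

-- getD through a '-1' scatter loop (twin of PySem.Dict.getD_foldl_modify_add_one)
lemma getD_foldl_modify_sub_one :
    ∀ (l : List Int) (d : PySem.Dict Int Int) (v : Int),
      (l.foldl (fun d x => d.modify x 0 (fun x => x - 1)) d).getD v 0 = d.getD v 0 - l.count v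
  | [], d, v => by simp
  | a :: l, d, v => by
    rw [List.foldl_cons, getD_foldl_modify_sub_one l _ v, PySem.Dict.getD_modify]
    rcases eq_or_ne v a with h | h <;> simp [h, List.count_cons] <;> omega

lemma count_ofList (l : List Int) (v : Int) :
    List.count v (PySem.Set.ofList l) = if v ∈ l then 1 else 0 := by
  by_cases h : v ∈ l
  · rw [if_pos h]
    exact List.count_eq_one_of_mem (PySem.Set.nodup_ofList l) ((PySem.Set.mem_ofList l v).mpr h)
  · rw [if_neg h]
    exact List.count_eq_zero_of_not_mem (fun hc => h ((PySem.Set.mem_ofList l v).mp hc))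

lemma scoresB_getD (nf ne tf te : List Int) (v : Int) :
    (scoresB nf ne tf te).getD v 0 = relScore nf ne tf te v := by
  unfold scoresB
  rw [getD_foldl_modify_sub_one, getD_foldl_modify_sub_one,
    PySem.Dict.getD_foldl_modify_add_one, PySem.Dict.getD_foldl_modify_add_one,
    PySem.Dict.getD_empty]
  simp only [count_ofList, relScore]
  split_ifs <;> push_cast <;> omega

lemma scoresB_keys_nodup (nf ne tf te : List Int) : (scoresB nf ne tf te).keys.Nodup := by
  unfold scoresB
  exact PySem.Dict.nodup_keys_foldl_modify_key _ (fun x => x) 0 (fun _ _ => (fun x => x - 1)) _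
    (PySem.Dict.nodup_keys_foldl_modify_key _ (fun x => x) 0 (fun _ _ => (fun x => x - 1)) _
      (PySem.Dict.nodup_keys_foldl_modify_key _ (fun x => x) 0 (fun _ _ => (fun x => x + 1)) _
        (PySem.Dict.nodup_keys_foldl_modify_key _ (fun x => x) 0 (fun _ _ => (fun x => x + 1)) _
          PySem.Dict.nodup_keys_empty)))

lemma scoresB_mem_keys (nf ne tf te : List Int) (v : Int) :
    v ∈ (scoresB nf ne tf te).keys ↔ v ∈ nf ∨ v ∈ ne ∨ v ∈ tf ∨ v ∈ te := by
  unfold scoresB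
  rw [PySem.Dict.keys_foldl_modify, PySem.Dict.keys_foldl_modify,
    PySem.Dict.keys_foldl_modify, PySem.Dict.keys_foldl_modify]
  simp only [PySem.Set.mem_update, PySem.Set.mem_ofList, PySem.Dict.keys_empty, List.not_mem_nil,
    false_or]
  tauto

lemma relScore_ne_zero_mem (nf ne tf te : List Int) (t : Int)
    (h : relScore nf ne tf te t ≠ 0) : t ∈ nf ∨ t ∈ ne ∨ t ∈ tf ∨ t ∈ te := by
  by_contra hc
  simp only [not_or] at hc
  simp [relScore, hc.1, hc.2.1, hc.2.2.1, hc.2.2.2] at h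

lemma mem_bFold_fst (planet_id : Int) (names : List String) :
    ∀ (l : List (Int × Int)) (s0 e0 : PySem.Set String) (x : String),
      x ∈ (l.foldl (bStep planet_id names) (s0, e0)).1 ↔
        x ∈ s0 ∨ ∃ p ∈ l, (0 ≤ p.1 ∧ p.1 < 9 ∧ p.1 ≠ planet_id ∧ p.2 ≠ 0) ∧ 0 < p.2 ∧
          PySem.List.pyGetD names p.1 "" = x
  | [], s0, e0, x => by simp
  | p :: l, s0, e0, x => by
    simp only [List.foldl_cons, List.mem_cons]
    rw [show bStep planet_id names (s0, e0) p
        = (if (0 ≤ p.1 ∧ p.1 < 9 ∧ p.1 ≠ planet_id ∧ p.2 ≠ 0) ∧ 0 < p.2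
             then s0.add (PySem.List.pyGetD names p.1 "") else s0,
           if (0 ≤ p.1 ∧ p.1 < 9 ∧ p.1 ≠ planet_id ∧ p.2 ≠ 0) ∧ ¬ 0 < p.2
             then e0.add (PySem.List.pyGetD names p.1 "") else e0) from by
      unfold bStep; split_ifs <;> simp_all]
    rw [mem_bFold_fst planet_id names l _ _ x]
    by_cases hc : (0 ≤ p.1 ∧ p.1 < 9 ∧ p.1 ≠ planet_id ∧ p.2 ≠ 0) ∧ 0 < p.2
    · simp only [if_pos hc, PySem.Set.mem_add]
      constructor
      · rintro (⟨h | h⟩ | ⟨q, hq, hcq⟩)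
        · exact Or.inl h
        · exact Or.inr ⟨p, Or.inl rfl, hc.1, hc.2, h.symm⟩
        · exact Or.inr ⟨q, Or.inr hq, hcq⟩
      · rintro (h | ⟨q, (rfl | hq), hcq⟩)
        · exact Or.inl (Or.inl h)
        · exact Or.inl (Or.inr hcq.2.2.symm)
        · exact Or.inr ⟨q, hq, hcq⟩
    · simp only [if_neg hc]
      constructor
      · rintro (h | ⟨q, hq, hcq⟩)
        · exact Or.inl h
        · exact Or.inr ⟨q, Or.inr hq, hcq⟩
      · rintro (h | ⟨q, (rfl | hq), hcq⟩)
        · exact Or.inl h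
        · exact absurd ⟨hcq.1, hcq.2.1⟩ hc
        · exact Or.inr ⟨q, hq, hcq⟩

lemma mem_bFold_snd (planet_id : Int) (names : List String) :
    ∀ (l : List (Int × Int)) (s0 e0 : PySem.Set String) (x : String),
      x ∈ (l.foldl (bStep planet_id names) (s0, e0)).2 ↔
        x ∈ e0 ∨ ∃ p ∈ l, (0 ≤ p.1 ∧ p.1 < 9 ∧ p.1 ≠ planet_id ∧ p.2 ≠ 0) ∧ ¬ 0 < p.2 ∧
          PySem.List.pyGetD names p.1 "" = x
  | [], s0, e0, x => by simp
  | p :: l, s0, e0, x => by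
    simp only [List.foldl_cons, List.mem_cons]
    rw [show bStep planet_id names (s0, e0) p
        = (if (0 ≤ p.1 ∧ p.1 < 9 ∧ p.1 ≠ planet_id ∧ p.2 ≠ 0) ∧ 0 < p.2
             then s0.add (PySem.List.pyGetD names p.1 "") else s0,
           if (0 ≤ p.1 ∧ p.1 < 9 ∧ p.1 ≠ planet_id ∧ p.2 ≠ 0) ∧ ¬ 0 < p.2
             then e0.add (PySem.List.pyGetD names p.1 "") else e0) from by
      unfold bStep; split_ifs <;> simp_all]
    rw [mem_bFold_snd planet_id names l _ _ x]
    by_cases hc : (0 ≤ p.1 ∧ p.1 < 9 ∧ p.1 ≠ planet_id ∧ p.2 ≠ 0) ∧ ¬ 0 < p.2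
    · simp only [if_pos hc, PySem.Set.mem_add]
      constructor
      · rintro (⟨h | h⟩ | ⟨q, hq, hcq⟩)
        · exact Or.inl h
        · exact Or.inr ⟨p, Or.inl rfl, hc.1, hc.2, h.symm⟩
        · exact Or.inr ⟨q, Or.inr hq, hcq⟩
      · rintro (h | ⟨q, (rfl | hq), hcq⟩)
        · exact Or.inl (Or.inl h)
        · exact Or.inl (Or.inr hcq.2.2.symm)
        · exact Or.inr ⟨q, hq, hcq⟩
    · simp only [if_neg hc]
      constructor
      · rintro (h | ⟨q, hq, hcq⟩)
        · exact Or.inl h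
        · exact Or.inr ⟨q, Or.inr hq, hcq⟩
      · rintro (h | ⟨q, (rfl | hq), hcq⟩)
        · exact Or.inl h
        · exact absurd ⟨hcq.1, hcq.2.1⟩ hc
        · exact Or.inr ⟨q, hq, hcq⟩

lemma nodup_bFold_fst (planet_id : Int) (names : List String) :
    ∀ (l : List (Int × Int)) (s0 e0 : PySem.Set String), s0.Nodup →
      (l.foldl (bStep planet_id names) (s0, e0)).1.Nodup
  | [], s0, e0, h => h
  | p :: l, s0, e0, h => by
    rw [List.foldl_cons]
    unfold bStep
    split_ifs with h1 h2
    · exact nodup_bFold_fst planet_id names l _ _ (PySem.Set.nodup_add _ _ h)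
    · exact nodup_bFold_fst planet_id names l _ _ h
    · exact nodup_bFold_fst planet_id names l _ _ h

lemma nodup_bFold_snd (planet_id : Int) (names : List String) :
    ∀ (l : List (Int × Int)) (s0 e0 : PySem.Set String), e0.Nodup →
      (l.foldl (bStep planet_id names) (s0, e0)).2.Nodup
  | [], s0, e0, h => h
  | p :: l, s0, e0, h => by
    rw [List.foldl_cons]
    unfold bStep
    split_ifs with h1 h2
    · exact nodup_bFold_snd planet_id names l _ _ h
    · exact nodup_bFold_snd planet_id names l _ _ (PySem.Set.nodup_add _ _ h)
    · exact nodup_bFold_snd planet_id names l _ _ h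

-- membership in B's scores.items()
lemma mem_scoresB_items (nf ne tf te : List Int) (p : Int × Int) :
    p ∈ (scoresB nf ne tf te).items ↔
      p.1 ∈ (scoresB nf ne tf te).keys ∧ p.2 = relScore nf ne tf te p.1 := by
  rw [PySem.Dict.items_eq_map_keys _ (scoresB_keys_nodup nf ne tf te) 0]
  simp only [List.mem_map]
  constructor
  · rintro ⟨k, hk, rfl⟩
    exact ⟨hk, scoresB_getD nf ne tf te k⟩
  · rintro ⟨hk, hv⟩
    exact ⟨p.1, hk, by rw [scoresB_getD, ← hv]⟩

-- ===== VERDICT (by name: the statement is the Claim_ definition above) =====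
theorem build_net_relation_py_spec : Claim_equal_build_net_relation_py := by
  intro pid nf ne tf te nn names _hdom _hpre
  unfold Spec_build_net_relation_py build_net_relation_py build_net_relation_py_alt
  simp only []
  have hfr : ∀ x : String,
      (x ∈ PySem.Set.ofList (((((PySem.List.pyRange 0 9 1).filter
          (fun t => decide (t ≠ pid ∧ relScore nf ne tf te t ≠ 0))).map
            (fun t => (t, relScore nf ne tf te t))).filter (fun p => decide (0 < p.2))).map
              (fun p => PySem.List.pyGetD names p.1 ""))) ↔
        x ∈ ((scoresB nf ne tf te).items.foldl (bStep pid names)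
          (PySem.Set.empty, PySem.Set.empty)).1 := by
    intro x
    rw [PySem.Set.mem_ofList, mem_bFold_fst]
    simp only [List.mem_map, List.mem_filter, PySem.List.mem_pyRange_one, decide_eq_true_eq,
      PySem.Set.empty, List.not_mem_nil, false_or]
    constructor
    · rintro ⟨p, ⟨⟨t, ⟨⟨ht0, ht9⟩, htp, hts⟩, rfl⟩, hpos⟩, rfl⟩
      refine ⟨(t, relScore nf ne tf te t), ?_, ⟨ht0, ht9, htp, hts⟩, hpos, rfl⟩
      rw [mem_scoresB_items]
      exact ⟨(scoresB_mem_keys nf ne tf te t).mpr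
        (by rcases relScore_ne_zero_mem nf ne tf te t hts with h | h | h | h <;> tauto), rfl⟩
    · rintro ⟨p, hp, ⟨hp0, hp9, hpp, hps⟩, hpos, rfl⟩
      rw [mem_scoresB_items] at hp
      exact ⟨p, ⟨⟨p.1, ⟨⟨hp0, hp9⟩, hpp, hp.2 ▸ hps⟩, by rw [← hp.2]⟩, hpos⟩, rfl⟩
  have hen : ∀ x : String,
      (x ∈ PySem.Set.ofList (((((PySem.List.pyRange 0 9 1).filter
          (fun t => decide (t ≠ pid ∧ relScore nf ne tf te t ≠ 0))).map
            (fun t => (t, relScore nf ne tf te t))).filter (fun p => decide (p.2 < 0))).map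
              (fun p => PySem.List.pyGetD names p.1 ""))) ↔
        x ∈ ((scoresB nf ne tf te).items.foldl (bStep pid names)
          (PySem.Set.empty, PySem.Set.empty)).2 := by
    intro x
    rw [PySem.Set.mem_ofList, mem_bFold_snd]
    simp only [List.mem_map, List.mem_filter, PySem.List.mem_pyRange_one, decide_eq_true_eq,
      PySem.Set.empty, List.not_mem_nil, false_or]
    constructor
    · rintro ⟨p, ⟨⟨t, ⟨⟨ht0, ht9⟩, htp, hts⟩, rfl⟩, hneg⟩, rfl⟩
      refine ⟨(t, relScore nf ne tf te t), ?_, ⟨ht0, ht9, htp, hts⟩, by omega, rfl⟩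
      rw [mem_scoresB_items]
      exact ⟨(scoresB_mem_keys nf ne tf te t).mpr
        (by rcases relScore_ne_zero_mem nf ne tf te t hts with h | h | h | h <;> tauto), rfl⟩
    · rintro ⟨p, hp, ⟨hp0, hp9, hpp, hps⟩, hneg, rfl⟩
      rw [mem_scoresB_items] at hp
      exact ⟨p, ⟨⟨p.1, ⟨⟨hp0, hp9⟩, hpp, hp.2 ▸ hps⟩, by rw [← hp.2]⟩, by omega⟩, rfl⟩
  rw [A_items]
  have e1 := (PySem.List.sorted_id_eq_sorted_id_iff_perm _ _).mpr
    ((List.perm_ext_iff_of_nodup (PySem.Set.nodup_ofList _)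
      (nodup_bFold_fst pid names _ PySem.Set.empty PySem.Set.empty (show ([] : List String).Nodup from List.nodup_nil))).mpr (fun x => hfr x))
  have e2 := (PySem.List.sorted_id_eq_sorted_id_iff_perm _ _).mpr
    ((List.perm_ext_iff_of_nodup (PySem.Set.nodup_ofList _)
      (nodup_bFold_snd pid names _ PySem.Set.empty PySem.Set.empty (show ([] : List String).Nodup from List.nodup_nil))).mpr (fun x => hen x))
  rw [e1, e2]
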